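-- pv_equiv track=rewrite | github.com/riiiiiicoooo/portfolio-intelligence-hub | tests/test_rbac.py | get_visible_columns
-- ===== SOURCE A (Python) =====
-- from typing import Any, Dict, List, Optional
--
-- class Role:
--     """Enumeration of user roles."""
--
--     PROPERTY_MANAGER = "property_manager"
--     BROKER = "broker"
--     FINANCE = "finance"
--     EXECUTIVE = "executive"
--     ADMIN = "admin"
--
-- def get_visible_columns(user_role: str) -> List[str]:
--     """Get list of visible columns for user role.
--
--     Args:
--         user_role: User's role
--
--     Returns:
--         List of column names visible to user
--     """
--     all_columns = [
--         "property_id",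
--         "property_name",
--         "address",
--         "valuation",
--         "units",
--         "noi",
--         "employee_salary",
--         "employee_benefits",
--         "vendor_payment_details",
--     ]
--
--     if user_role == Role.ADMIN:
--         return all_columns
--
--     if user_role == Role.FINANCE:
--         return [
--             col
--             for col in all_columns
--             if col not in ["employee_salary", "employee_benefits"]
--         ]
--
--     if user_role == Role.PROPERTY_MANAGER:
--         return [
--             col
--             for col in all_columns
--             if col
--             not in [
--                 "employee_salary",
--                 "employee_benefits",
--                 "vendor_payment_details",
--             ]
--         ]
--
--     if user_role == Role.BROKER:
--         return [col for col in all_columns if col not in ["employee_salary"]]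
--
--     return ["property_id", "property_name", "address"]
-- ===== SOURCE B (Python) =====
-- def get_visible_columns(user_role: str) -> list:
--     """Get list of visible columns for user role (precomputed table lookup)."""
--     visible = {
--         "admin": [
--             "property_id", "property_name", "address", "valuation", "units",
--             "noi", "employee_salary", "employee_benefits",
--             "vendor_payment_details",
--         ],
--         "finance": [
--             "property_id", "property_name", "address", "valuation", "units",
--             "noi", "vendor_payment_details",
--         ],
--         "property_manager": [
--             "property_id", "property_name", "address", "valuation", "units",
--             "noi",
--         ],
--         "broker": [
--             "property_id", "property_name", "address", "valuation", "units",
--             "noi", "employee_benefits", "vendor_payment_details",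
--         ],
--     }
--     return visible.get(user_role, ["property_id", "property_name", "address"])
-- ===== Notes on version B (the rewrite author's own statement) =====
-- stated objective: idiomatic
-- what changed: Replaced the five-branch if-ladder that filters all_columns with per-role exclusion lists by a single precomputed role->visible-columns table and one dict lookup with a default; no filtering pass remains.
import Mathlib
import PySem

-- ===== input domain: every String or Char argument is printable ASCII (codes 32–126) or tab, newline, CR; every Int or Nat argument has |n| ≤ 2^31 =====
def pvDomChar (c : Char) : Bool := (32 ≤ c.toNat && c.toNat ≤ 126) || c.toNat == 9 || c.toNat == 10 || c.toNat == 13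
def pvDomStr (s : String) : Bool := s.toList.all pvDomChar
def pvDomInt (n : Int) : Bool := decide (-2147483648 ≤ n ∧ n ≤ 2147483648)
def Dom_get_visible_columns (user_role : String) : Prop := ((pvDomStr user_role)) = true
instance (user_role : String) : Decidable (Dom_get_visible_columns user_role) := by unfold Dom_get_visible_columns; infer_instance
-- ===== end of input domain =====

-- B replaces the if-ladder that filters the column list by a precomputed role→visible-columns table with one dict lookup (idiomatic).


-- ===== PORT A =====
def get_visible_columns (user_role : String) : List String :=
  let all_columns : List String :=
    ["property_id", "property_name", "address", "valuation", "units",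
     "noi", "employee_salary", "employee_benefits", "vendor_payment_details"]
  if user_role == "admin" then all_columns
  else if user_role == "finance" then
    all_columns.filter (fun col => !(["employee_salary", "employee_benefits"].contains col))
  else if user_role == "property_manager" then
    all_columns.filter (fun col => !(["employee_salary", "employee_benefits", "vendor_payment_details"].contains col))
  else if user_role == "broker" then
    all_columns.filter (fun col => !(["employee_salary"].contains col))
  else ["property_id", "property_name", "address"]

-- ===== PORT B =====
def get_visible_columns_alt (user_role : String) : List String :=
  let visible : PySem.Dict String (List String) :=
    PySem.Dict.ofList
    [("admin",
      ["property_id", "property_name", "address", "valuation", "units",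
       "noi", "employee_salary", "employee_benefits", "vendor_payment_details"]),
     ("finance",
      ["property_id", "property_name", "address", "valuation", "units",
       "noi", "vendor_payment_details"]),
     ("property_manager",
      ["property_id", "property_name", "address", "valuation", "units", "noi"]),
     ("broker",
      ["property_id", "property_name", "address", "valuation", "units",
       "noi", "employee_benefits", "vendor_payment_details"])]
  PySem.Dict.getD visible user_role ["property_id", "property_name", "address"]

-- ===== PRECONDITION & SPEC =====
def Spec_get_visible_columns (user_role : String) (out : List String) : Prop := out = get_visible_columns_alt user_role
instance (user_role : String) (out : List String) : Decidable (Spec_get_visible_columns user_role out) := by unfold Spec_get_visible_columns; infer_instance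

-- ===== CLAIM (what is proved, stated in full; the proofs are below) =====
def Claim_equal_get_visible_columns : Prop := ∀ (user_role : String), Dom_get_visible_columns user_role → Spec_get_visible_columns user_role (get_visible_columns user_role)

-- ===== LEMMAS AND PROOFS =====

-- ===== VERDICT (by name: the statement is the Claim_ definition above) =====
theorem get_visible_columns_spec : Claim_equal_get_visible_columns := by
  intro user_role _
  unfold Spec_get_visible_columns get_visible_columns get_visible_columns_alt
  by_cases h1 : user_role = "admin" <;>
    by_cases h2 : user_role = "finance" <;>
      by_cases h3 : user_role = "property_manager" <;>
        by_cases h4 : user_role = "broker" <;>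
          simp_all [PySem.Dict.ofList, PySem.Dict.update, PySem.Dict.insert,
            PySem.Dict.empty, PySem.Dict.getD, PySem.Dict.get?, List.find?];
  · have a1 : ("admin" == user_role) = false := beq_eq_false_iff_ne.mpr (fun h => h1 h.symm)
    have a2 : ("finance" == user_role) = false := beq_eq_false_iff_ne.mpr (fun h => h2 h.symm)
    have a3 : ("property_manager" == user_role) = false := beq_eq_false_iff_ne.mpr (fun h => h3 h.symm)
    have a4 : ("broker" == user_role) = false := beq_eq_false_iff_ne.mpr (fun h => h4 h.symm)
    simp [a1, a2, a3, a4]
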